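-- pv_equiv track=rewrite | github.com/Indian966/Algorythm_Study | CodingTest/0802CodingTest02.py | solution
-- ===== SOURCE A (Python) =====
-- def solution(s) :
--     answer = 0
--     need = ''
--
--     if s.count('(') > s.count(')') :
--         need = ')'
--     elif s.count('(') < s.count(')') :
--         need = '('
--     elif s.count('[') > s.count(']'):
--         need = ']'
--     elif s.count('[') < s.count(']'):
--         need = '['
--     elif s.count('{') > s.count('}'):
--         need = '}'
--     elif s.count('{') < s.count('}'):
--         need = '{'
--
--     def check(s):
--         stack = []
--         open = '([{'
--         for c in s:
--             if c in open:
--                 stack.append(c)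
--             elif c == ')' and stack and stack[-1] != '(':
--                 return False
--             elif c == ']' and stack and stack[-1] != '[':
--                 return False
--             elif c == '}' and stack and stack[-1] != '{':
--                 return False
--             elif not stack:
--                 return False
--             else:
--                 stack.pop()
--         return len(stack) == 0
--
--     for i in range(len(s)+1) :
--         array = s[:i] + need + s[i:]
--         if check(array) :
--             answer+=1
--
--     return answer
-- ===== SOURCE B (Python) =====
-- def solution(s):
--     # One left-to-right pass carries the bracket-stack state of each prefix
--     # (persistent cons-cells), so every insertion position is checked by
--     # scanning only its suffix -- no string rebuilding, no prefix rescans.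
--     counts = {}
--     for ch in s:
--         counts[ch] = counts.get(ch, 0) + 1
--     need = ''
--     for op, cl in ('()', '[]', '{}'):
--         a, b = counts.get(op, 0), counts.get(cl, 0)
--         if a != b:
--             need = cl if a > b else op
--             break
--
--     OPEN = '([{'
--     MATCH = {')': '(', ']': '[', '}': '{'}
--     FAIL = 'FAIL'  # sentinel (stacks are None or pairs, never this string)
--
--     def step(st, ch):
--         if ch in OPEN:
--             return (ch, st)
--         if st is None:
--             return FAIL
--         top, below = st
--         m = MATCH.get(ch)
--         if m is not None and top != m:
--             return FAIL
--         return below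
--
--     answer = 0
--     st = None  # stack state after the current prefix s[:i]
--     n = len(s)
--     for i in range(n + 1):
--         cur = step(st, need) if need else st
--         j = i
--         while cur is not FAIL and j < n:
--             cur = step(cur, s[j])
--             j += 1
--         if cur is None:
--             answer += 1
--         if i < n:
--             st = step(st, s[i])
--             if st is FAIL:
--                 break
--     return answer
-- ===== Notes on version B (the rewrite author's own statement) =====
-- stated objective: faster
-- what changed: Instead of rebuilding the whole string and re-running the bracket check from scratch for every insertion position, B makes one left-to-right pass that carries each prefix's stack state (persistent cons cells) and checks each position by scanning only its suffix, breaking out as soon as the prefix state fails.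
import Mathlib
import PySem

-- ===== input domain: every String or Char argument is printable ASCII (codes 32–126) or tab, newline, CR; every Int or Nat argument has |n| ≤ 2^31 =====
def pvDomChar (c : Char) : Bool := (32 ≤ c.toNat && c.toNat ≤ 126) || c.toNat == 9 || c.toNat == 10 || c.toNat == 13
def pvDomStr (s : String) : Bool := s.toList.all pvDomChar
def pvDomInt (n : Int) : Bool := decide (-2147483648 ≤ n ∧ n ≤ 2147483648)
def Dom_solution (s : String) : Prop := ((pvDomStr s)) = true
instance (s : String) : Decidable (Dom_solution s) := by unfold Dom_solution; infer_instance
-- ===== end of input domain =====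

-- B replaces A's rebuild-the-string-and-recheck-from-scratch loop by one pass that
-- carries each prefix's bracket-stack state, so each position only scans its suffix.

-- ===== PORT A =====
-- A's inner check(s): stack kept with its top at the head (Python appends/pops at the end)
def checkA : List Char → List Char → Bool
  | stack, [] => decide (stack.length = 0)
  | stack, c :: rest =>
    if c == '(' || c == '[' || c == '{' then checkA (c :: stack) rest
    else
      match stack with
      | [] => false            -- the three mismatch tests need a nonempty stack; 'elif not stack'
      | top :: below =>
        if c == ')' && top != '(' then false
        else if c == ']' && top != '[' then false
        else if c == '}' && top != '{' then false
        else checkA below rest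

def solution (s : String) : Int :=
  let need : String :=
    if PySem.Str.count s "(" > PySem.Str.count s ")" then ")"
    else if PySem.Str.count s "(" < PySem.Str.count s ")" then "("
    else if PySem.Str.count s "[" > PySem.Str.count s "]" then "]"
    else if PySem.Str.count s "[" < PySem.Str.count s "]" then "["
    else if PySem.Str.count s "{" > PySem.Str.count s "}" then "}"
    else if PySem.Str.count s "{" < PySem.Str.count s "}" then "{"
    else ""
  let chars := s.toList
  (List.range (chars.length + 1)).foldl
    (fun answer i =>
      let array := chars.take i ++ need.toList ++ chars.drop i
      if checkA [] array then answer + 1 else answer) 0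

-- ===== PORT B =====
-- Source B's MATCH dict
def matchB : PySem.Dict Char Char := PySem.Dict.ofList [(')', '('), (']', '['), ('}', '{')]

-- Source B's step(st, ch); none = the FAIL sentinel, some st = a live stack (cons cells)
def stepB (st : List Char) (ch : Char) : Option (List Char) :=
  if ch == '(' || ch == '[' || ch == '{' then some (ch :: st)
  else
    match st with
    | [] => none
    | top :: below =>
      match matchB.get? ch with
      | some m => if top != m then none else some below
      | none => some below

-- Source B's inner while loop over the suffix
def suffixRun : Option (List Char) → List Char → Option (List Char)
  | none, _ => none
  | some st, [] => some st
  | some st, c :: rest => suffixRun (stepB st c) rest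

-- Source B's for op, cl in … loop with break ('' rendered as none)
def needLoopB (g : Char → Int) : List (Char × Char) → Option Char
  | [] => none
  | (op, cl) :: rest =>
    let a := g op
    let b := g cl
    if a ≠ b then some (if a > b then cl else op) else needLoopB g rest

-- Source B's main for-loop: st is the prefix state; break once it fails (contributes 0)
def loopB (need : Option Char) : Option (List Char) → List Char → Int
  | none, _ => 0
  | some st, rest =>
    let cur : Option (List Char) := match need with | some c => stepB st c | none => some st
    let contrib : Int := if suffixRun cur rest = some [] then 1 else 0
    match rest with
    | [] => contrib
    | c :: rest' => contrib + loopB need (stepB st c) rest'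

def solution_alt (s : String) : Int :=
  let chars := s.toList
  let counts := chars.foldl (fun d ch => d.insert ch (d.getD ch 0 + 1)) PySem.Dict.empty
  let need := needLoopB (fun c => counts.getD c 0) [('(', ')'), ('[', ']'), ('{', '}')]
  loopB need (some []) chars

-- ===== PRECONDITION & SPEC =====
def Spec_solution (s : String) (out : Int) : Prop := out = solution_alt s
instance (s : String) (out : Int) : Decidable (Spec_solution s out) := by unfold Spec_solution; infer_instance

-- ===== CLAIM (what is proved, stated in full; the proofs are below) =====
def Claim_equal_solution : Prop := ∀ (s : String), Dom_solution s → Spec_solution s (solution s)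

-- ===== LEMMAS AND PROOFS =====

def optL : Option Char → List Char
  | none => []
  | some c => [c]

theorem count_go_singleton (c : Char) : ∀ (l : List Char) (fuel acc : Nat), l.length ≤ fuel →
    PySem.Chars.count.go [c] fuel l acc = acc + l.count c := by
  intro l
  induction l with
  | nil => intro fuel acc h; cases fuel <;> simp [PySem.Chars.count.go]
  | cons h t ih =>
    intro fuel acc hf
    cases fuel with
    | zero => simp at hf
    | succ f =>
      have hlen : t.length ≤ f := by simpa using hf
      simp only [PySem.Chars.count.go, List.isPrefixOf, Bool.and_true, List.length_cons,
        List.drop_succ_cons, List.length_nil, List.drop_zero]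
      by_cases hc : (c == h) = true
      · have hc' : c = h := by simpa using hc
        subst hc'
        rw [if_pos hc, ih f (acc + 1) hlen, List.count_cons]
        simp
        omega
      · have hc' : ¬ h = c := fun e => hc (by simp [e])
        rw [if_neg hc, ih f acc hlen, List.count_cons, if_neg (by simpa using hc')]
        omega

theorem chars_count_singleton (c : Char) (l : List Char) :
    PySem.Chars.count l [c] = l.count c := by
  unfold PySem.Chars.count
  simpa using count_go_singleton c l l.length 0 le_rfl

theorem matchB_get (ch : Char) : matchB.get? ch =
    if ch == ')' then some '(' else if ch == ']' then some '[' else if ch == '}' then some '{' else none := by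
  by_cases h1 : ch = ')'
  · subst h1; decide
  by_cases h2 : ch = ']'
  · subst h2; decide
  by_cases h3 : ch = '}'
  · subst h3; decide
  have e : matchB = PySem.Dict.mk [(')', '('), (']', '['), ('}', '{')] := rfl
  have e1 : (')' == ch) = false := beq_eq_false_iff_ne.mpr (Ne.symm h1)
  have e2 : (']' == ch) = false := beq_eq_false_iff_ne.mpr (Ne.symm h2)
  have e3 : ('}' == ch) = false := beq_eq_false_iff_ne.mpr (Ne.symm h3)
  have f1 : (ch == ')') = false := beq_eq_false_iff_ne.mpr h1
  have f2 : (ch == ']') = false := beq_eq_false_iff_ne.mpr h2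
  have f3 : (ch == '}') = false := beq_eq_false_iff_ne.mpr h3
  rw [e]
  simp only [PySem.Dict.get?_mk_cons, e1, e2, e3, f1, f2, f3, Bool.false_eq_true, if_false]
  rfl

theorem suffixRun_none (b : List Char) : suffixRun none b = none := by cases b <;> rfl

theorem checkA_eq (l : List Char) : ∀ st, checkA st l = (suffixRun (some st) l == some []) := by
  induction l with
  | nil => intro st; cases st <;> simp [checkA, suffixRun]
  | cons c rest ih =>
    intro st
    simp only [checkA, suffixRun, stepB]
    by_cases hopen : (c == '(' || c == '[' || c == '{') = true
    · rw [if_pos hopen, if_pos hopen, ih]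
    · rw [if_neg hopen, if_neg hopen]
      cases st with
      | nil => simp [suffixRun_none]
      | cons top below =>
        rw [matchB_get c]
        split_ifs <;> simp_all [ih, suffixRun_none] <;> split_ifs <;> simp_all [suffixRun_none]

theorem suffixRun_append (a b : List Char) : ∀ o, suffixRun o (a ++ b) = suffixRun (suffixRun o a) b := by
  induction a with
  | nil => intro o; cases o <;> simp [suffixRun, suffixRun_none]
  | cons c rest ih =>
    intro o
    cases o with
    | none => simp [suffixRun_none]
    | some st => simp [suffixRun, ih]

theorem ins_step (need : Option Char) (st : List Char) :
    (match need with | some c => stepB st c | none => some st) = suffixRun (some st) (optL need) := by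
  cases need with
  | none => rfl
  | some c =>
    show stepB st c = suffixRun (some st) [c]
    rcases h : stepB st c with _ | x <;> simp [suffixRun, h, suffixRun_none]

theorem countP_succ_shift (p : Nat → Bool) (n : Nat) :
    (List.range (n + 1)).countP p = (if p 0 then 1 else 0) + (List.range n).countP (fun i => p (i + 1)) := by
  rw [List.range_succ_eq_map, List.countP_cons, List.countP_map]
  by_cases h : p 0 = true <;> simp [h, Function.comp_def] <;> omega

theorem loopB_eq (need : Option Char) (rest : List Char) : ∀ σ : List Char,
    loopB need (some σ) rest
      = ((List.range (rest.length + 1)).countP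
          (fun i => suffixRun (some σ) (rest.take i ++ optL need ++ rest.drop i) == some []) : Int) := by
  induction rest with
  | nil =>
    intro σ
    simp only [loopB, ins_step, List.length_nil, List.range_one, List.countP_cons, List.countP_nil,
      List.take_nil, List.drop_nil, List.append_nil, List.nil_append]
    rcases hX : suffixRun (some σ) (optL need) with _ | s
    · simp [suffixRun_none]
    · rcases s with _ | ⟨a, s'⟩ <;> simp [suffixRun]
  | cons c rest' ih =>
    intro σ
    simp only [loopB, ins_step, List.length_cons]
    rw [countP_succ_shift]
    have hp0 : ∀ i : Nat, ((c :: rest').take (i+1) ++ optL need ++ (c :: rest').drop (i+1))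
        = c :: (rest'.take i ++ optL need ++ rest'.drop i) := by
      intro i; simp [List.take_succ_cons, List.drop_succ_cons]
    have hhead : suffixRun (suffixRun (some σ) (optL need)) (c :: rest')
        = suffixRun (some σ) ((c :: rest').take 0 ++ optL need ++ (c :: rest').drop 0) := by
      simp [suffixRun_append]
    rcases hs : stepB σ c with _ | σ'
    · have hz : (fun i => suffixRun (some σ)
            ((c :: rest').take (i+1) ++ optL need ++ (c :: rest').drop (i+1)) == some [])
          = fun _ => false := by
        funext i
        rw [hp0 i]
        show (suffixRun (stepB σ c) (rest'.take i ++ optL need ++ rest'.drop i) == some []) = false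
        rw [hs, suffixRun_none]
        rfl
      simp only [hz, hhead.symm, List.countP_false, hs]
      rcases hX : suffixRun (suffixRun (some σ) (optL need)) (c :: rest') with _ | s
      · simp [loopB]
      · rcases s with _ | ⟨a, s'⟩ <;> simp [loopB]
    · have hsh : (fun i => suffixRun (some σ)
            ((c :: rest').take (i+1) ++ optL need ++ (c :: rest').drop (i+1)) == some [])
          = fun i => suffixRun (some σ') (rest'.take i ++ optL need ++ rest'.drop i) == some [] := by
        funext i
        rw [hp0 i]
        show (suffixRun (stepB σ c) (rest'.take i ++ optL need ++ rest'.drop i) == some []) = _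
        rw [hs]
      rw [hsh, ih σ']
      simp only [hhead.symm]
      rcases hX : suffixRun (suffixRun (some σ) (optL need)) (c :: rest') with _ | s
      · simp
      · rcases s with _ | ⟨a, s'⟩ <;> simp <;> push_cast <;> ring

theorem need_eq (l : List Char) :
    (if l.count '(' > l.count ')' then [')']
     else if l.count '(' < l.count ')' then ['(']
     else if l.count '[' > l.count ']' then [']']
     else if l.count '[' < l.count ']' then ['[']
     else if l.count '{' > l.count '}' then ['}']
     else if l.count '{' < l.count '}' then ['{']
     else ([] : List Char))
    = optL (needLoopB (fun c => (PySem.Dict.counter l).getD c 0)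
        [('(', ')'), ('[', ']'), ('{', '}')]) := by
  simp only [needLoopB, PySem.Dict.getD_counter]
  split_ifs <;> simp_all [optL] <;> omega

-- ===== VERDICT (by name: the statement is the Claim_ definition above) =====
theorem solution_spec : Claim_equal_solution := by
  intro s _
  unfold Spec_solution solution solution_alt
  dsimp only
  rw [PySem.Dict.foldl_insert_getD_add_one_eq_counter]
  simp only [PySem.Str.count_eq, apply_ite String.toList,
    show (")" : String).toList = [')'] from rfl, show ("(" : String).toList = ['('] from rfl,
    show ("]" : String).toList = [']'] from rfl, show ("[" : String).toList = ['['] from rfl,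
    show ("}" : String).toList = ['}'] from rfl, show ("{" : String).toList = ['{'] from rfl,
    show ("" : String).toList = [] from rfl,
    chars_count_singleton]
  rw [need_eq s.toList, PySem.List.foldl_if_add_one, loopB_eq _ s.toList []]
  rw [zero_add]
  congr 1
  exact List.countP_congr fun i _ => by rw [checkA_eq]
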